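-- pv_equiv track=rewrite | github.com/aaronscode/meZip | mezip.py | tokenizeCompressed
-- ===== SOURCE A (Python) =====
-- def tokenizeCompressed(byte_string, bits_per_sym):
--     tokens = []
--     token_count = 0
--     token_index = 0
--     token = ''
--     bits_to_use = 0
--     bit_counter = 0
--
--     while token_index + 1 < len(byte_string):
--         if token_count < 1:
--             token = byte_string[0:bits_per_sym]
--             token_count = token_count + 1
--             token_index = bits_per_sym
--             bits_to_use = bits_to_use + 1
--             bit_counter = 1
--         else:
--             len_token = bits_to_use + bits_per_sym
--             if len_token + token_index + 1 < len(byte_string):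
--                 token = byte_string[token_index:token_index+len_token]
--             else:
--                 token = byte_string[token_index:]
--
--             token_count = token_count + 1
--             token_index = token_index + len_token
--
--             bit_counter = bit_counter - 1
--             if bit_counter == 0:
--                 bits_to_use = bits_to_use + 1
--                 bit_counter = 2 ** (bits_to_use - 1)
--
--         tokens.append(token)
--
--     return tokens
-- ===== SOURCE B (Python) =====
-- def tokenizeCompressed(byte_string, bits_per_sym):
--     # Staged passes with a closed-form level: token k's length is
--     # bits_per_sym + k.bit_length(); pass 1 builds the cut table (start, length),
--     # pass 2 slices the string at those cuts (first token is byte_string[0:bits_per_sym]).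
--     n = len(byte_string)
--     cuts = []
--     start, k = 0, 0
--     while start + 1 < n:
--         length = bits_per_sym + k.bit_length()
--         cuts.append((start, length))
--         start += length
--         k += 1
--     if not cuts:
--         return []
--     out = [byte_string[0:bits_per_sym]]
--     for s0, ln in cuts[1:]:
--         if ln + s0 + 1 < n:
--             out.append(byte_string[s0:s0 + ln])
--         else:
--             out.append(byte_string[s0:])
--     return out
-- ===== Notes on version B (the rewrite author's own statement) =====
-- stated objective: alternative
-- what changed: A's flat while loop with a resetting bit_counter/bits_to_use state machine is replaced by two staged passes using a closed-form level: pass 1 builds a cut table where token k's length is bits_per_sym + k.bit_length(), pass 2 slices the string at those cuts.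
import Mathlib
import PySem

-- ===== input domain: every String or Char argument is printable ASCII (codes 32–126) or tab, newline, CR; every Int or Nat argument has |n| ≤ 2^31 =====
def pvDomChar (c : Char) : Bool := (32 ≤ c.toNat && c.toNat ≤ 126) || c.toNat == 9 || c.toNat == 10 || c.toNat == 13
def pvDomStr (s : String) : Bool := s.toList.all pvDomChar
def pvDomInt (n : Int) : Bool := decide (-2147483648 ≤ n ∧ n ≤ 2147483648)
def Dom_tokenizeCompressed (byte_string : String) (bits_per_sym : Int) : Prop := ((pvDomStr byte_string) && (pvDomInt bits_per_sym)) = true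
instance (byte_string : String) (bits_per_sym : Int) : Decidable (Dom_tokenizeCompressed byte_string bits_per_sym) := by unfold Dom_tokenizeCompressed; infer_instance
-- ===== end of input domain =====

-- B replaces A's flat loop with resetting bit_counter/bits_to_use state by two staged
-- passes using the closed-form level bit_length(k): pass 1 builds a cut table of
-- (start, length) pairs, pass 2 slices the string at those cuts; same cost, alternative algorithm.

-- ===== PORT A =====
-- the while loop of A, one fuel unit per iteration (fuel only makes the recursion
-- total; on Pre_ the fuel given below is never exhausted).
-- state: tokens, token_count, token_index, bits_to_use, bit_counter
def tcLoopA (cs : List Char) (bps : Int) : Nat → List String → Int → Int → Int → Int → List String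
  | 0, tokens, _, _, _, _ => tokens
  | f + 1, tokens, tc, ti, btu, bc =>
    if ti + 1 < (cs.length : Int) then
      if tc < 1 then
        tcLoopA cs bps f (tokens ++ [String.ofList (PySem.List.slice cs (some 0) (some bps))])
          (tc + 1) bps (btu + 1) 1
      else
        let lenTok := btu + bps
        let tok := if lenTok + ti + 1 < (cs.length : Int)
          then PySem.List.slice cs (some ti) (some (ti + lenTok))
          else PySem.List.slice cs (some ti) none
        let bc' := bc - 1
        if bc' = 0 then
          -- bits_to_use += 1; bit_counter = 2 ** (bits_to_use - 1)  (.toNat exact: exponent ≥ 0 on Pre_)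
          tcLoopA cs bps f (tokens ++ [String.ofList tok]) (tc + 1) (ti + lenTok) (btu + 1)
            ((2 : Int) ^ (((btu + 1) - 1).toNat))
        else
          tcLoopA cs bps f (tokens ++ [String.ofList tok]) (tc + 1) (ti + lenTok) btu bc'
    else tokens

def tokenizeCompressed (byte_string : String) (bits_per_sym : Int) : List String :=
  let cs := byte_string.toList
  tcLoopA cs bits_per_sym (cs.length + 2) [] 0 0 0 0

-- ===== PORT B =====
-- pass 1: the `while start + 1 < n` loop building the cut table; token k's length is
-- bits_per_sym + k.bit_length() (= PySem.Int.bitLength). Fuel only for totality.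
def tcCutsB (n bps : Int) : Nat → Int → Int → List (Int × Int)
  | 0, _, _ => []
  | f + 1, start, k =>
    if start + 1 < n then
      let length := bps + (PySem.Int.bitLength k : Int)
      (start, length) :: tcCutsB n bps f (start + length) (k + 1)
    else []

-- pass 2 body: one token from a cut (start, length) past the first
def tcRenderB (cs : List Char) (c : Int × Int) : String :=
  if c.2 + c.1 + 1 < (cs.length : Int)
  then String.ofList (PySem.List.slice cs (some c.1) (some (c.1 + c.2)))
  else String.ofList (PySem.List.slice cs (some c.1) none)

-- pass 2: `if not cuts: return []` then first token + the loop over cuts[1:]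
def tcPass2 (cs : List Char) (bps : Int) : List (Int × Int) → List String
  | [] => []
  | _ :: rest =>
    String.ofList (PySem.List.slice cs (some 0) (some bps)) :: rest.map (tcRenderB cs)

def tokenizeCompressed_alt (byte_string : String) (bits_per_sym : Int) : List String :=
  let cs := byte_string.toList
  tcPass2 cs bits_per_sym (tcCutsB (cs.length : Int) bits_per_sym (cs.length + 2) 0 0)

-- ===== PRECONDITION & SPEC =====
-- Pre_ excludes negative bits_per_sym: a negative bit width is outside the function's
-- natural domain; there both programs return only via Python's negative-slice wraparound
-- and take about 2^|bits_per_sym| iterations (practically divergent for large negatives).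
def Pre_tokenizeCompressed (byte_string : String) (bits_per_sym : Int) : Prop :=
  0 ≤ bits_per_sym
instance (byte_string : String) (bits_per_sym : Int) : Decidable (Pre_tokenizeCompressed byte_string bits_per_sym) := by unfold Pre_tokenizeCompressed; infer_instance

def pvWitness_tokenizeCompressed : String × Int := ("010110", 2)

def Spec_tokenizeCompressed (byte_string : String) (bits_per_sym : Int) (out : List String) : Prop := out = tokenizeCompressed_alt byte_string bits_per_sym
instance (byte_string : String) (bits_per_sym : Int) (out : List String) : Decidable (Spec_tokenizeCompressed byte_string bits_per_sym out) := by unfold Spec_tokenizeCompressed; infer_instance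

-- ===== CLAIM (what is proved, stated in full; the proofs are below) =====
def Claim_equal_tokenizeCompressed : Prop := ∀ (byte_string : String) (bits_per_sym : Int), Dom_tokenizeCompressed byte_string bits_per_sym → Pre_tokenizeCompressed byte_string bits_per_sym → Spec_tokenizeCompressed byte_string bits_per_sym (tokenizeCompressed byte_string bits_per_sym)

-- ===== LEMMAS AND PROOFS =====

-- fuel-free reference for A's loop body (proof helper only)
def refLoop (cs : List Char) (bps : Int) (tokens : List String) (i e c : Int) : List String :=
  if h : i + 1 < (cs.length : Int) ∧ 0 < e + bps ∧ 1 ≤ c then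
    let lt := e + bps
    let tok := if lt + i + 1 < (cs.length : Int)
      then PySem.List.slice cs (some i) (some (i + lt))
      else PySem.List.slice cs (some i) none
    if c - 1 = 0 then
      refLoop cs bps (tokens ++ [String.ofList tok]) (i + lt) (e + 1) ((2 : Int) ^ e.toNat)
    else
      refLoop cs bps (tokens ++ [String.ofList tok]) (i + lt) e (c - 1)
  else tokens
termination_by ((cs.length : Int) - 1 - i).toNat
decreasing_by
  · omega
  · omega

lemma A_eq_ref (cs : List Char) (bps : Int) :
    ∀ (f : Nat) (tokens : List String) (tc i e c : Int),
      0 ≤ bps → 1 ≤ e → 1 ≤ c → 1 ≤ tc → (((cs.length : Int) - 1 - i).toNat ≤ f) →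
      tcLoopA cs bps f tokens tc i e c = refLoop cs bps tokens i e c := by
  intro f
  induction f with
  | zero =>
    intro tokens tc i e c hb he hc htc hf
    have hstop : ¬ (i + 1 < (cs.length : Int)) := by omega
    rw [tcLoopA, refLoop]
    simp [hstop]
  | succ f ih =>
    intro tokens tc i e c hb he hc htc hf
    by_cases hlt : i + 1 < (cs.length : Int)
    · rw [tcLoopA, refLoop]
      have htc' : ¬ (tc < 1) := by omega
      have hg : i + 1 < (cs.length : Int) ∧ 0 < e + bps ∧ 1 ≤ c := ⟨hlt, by omega, hc⟩
      rw [dif_pos hg, if_pos hlt, if_neg htc']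
      by_cases hz : c - 1 = 0
      · simp only [hz, if_pos]
        rw [ih _ _ _ _ _ (by omega) (by omega) (one_le_pow₀ (by omega)) (by omega) (by omega)]
        have : ((e + 1) - 1).toNat = e.toNat := by omega
        rw [this]
      · simp only [hz, if_neg, not_false_eq_true]
        exact ih _ _ _ _ _ (by omega) (by omega) (by omega) (by omega) (by omega)
    · rw [tcLoopA, refLoop]
      simp [hlt]

-- bitLength of a positive Nat cast, characterized by the power-of-two bracket
lemma blen_bounds (k : Nat) (hk : 1 ≤ k) :
    2 ^ (PySem.Int.bitLength (k : Int) - 1) ≤ k ∧ k < 2 ^ (PySem.Int.bitLength (k : Int)) := by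
  have h1 := PySem.Int.two_pow_bitLength_le (k : Int) (by exact_mod_cast Nat.one_le_iff_ne_zero.mp hk)
  have h2 := PySem.Int.lt_two_pow_bitLength (k : Int)
  simpa using ⟨h1, h2⟩

lemma blen_pos (k : Nat) (hk : 1 ≤ k) : 1 ≤ PySem.Int.bitLength (k : Int) := by
  by_contra h
  have hz : PySem.Int.bitLength (k : Int) = 0 := by omega
  have := (blen_bounds k hk).2
  rw [hz] at this
  simp at this
  omega

lemma blen_unique (m e : Nat) (hm : 1 ≤ m) (he : 1 ≤ e)
    (h1 : 2 ^ (e - 1) ≤ m) (h2 : m < 2 ^ e) : PySem.Int.bitLength (m : Int) = e := by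
  have hbp := blen_pos m hm
  obtain ⟨hl, hr⟩ := blen_bounds m hm
  by_contra hne
  rcases Nat.lt_or_ge (PySem.Int.bitLength (m : Int)) e with hlt | hge
  · have hx : 2 ^ (PySem.Int.bitLength (m : Int)) ≤ 2 ^ (e - 1) :=
      Nat.pow_le_pow_right (by norm_num) (by omega)
    omega
  · have hx : 2 ^ e ≤ 2 ^ (PySem.Int.bitLength (m : Int) - 1) :=
      Nat.pow_le_pow_right (by norm_num) (by omega)
    omega

-- B's pass 1 + pass-2 map computes exactly A's reference loop, with state
-- e = bit_length(k), c = 2^e - k at token ordinal k ≥ 1.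
lemma ref_eq_cuts (cs : List Char) (bps : Int) (hb : 0 ≤ bps) :
    ∀ (f : Nat) (tokens : List String) (i : Int) (k : Nat), 1 ≤ k →
      (((cs.length : Int) - 1 - i).toNat ≤ f) →
      refLoop cs bps tokens i (PySem.Int.bitLength (k : Int) : Int)
          ((2 : Int) ^ (PySem.Int.bitLength (k : Int)) - (k : Int))
        = tokens ++ (tcCutsB (cs.length : Int) bps f i (k : Int)).map (tcRenderB cs) := by
  intro f
  induction f with
  | zero =>
    intro tokens i k hk hf
    have hstop : ¬ (i + 1 < (cs.length : Int)) := by omega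
    rw [tcCutsB, refLoop]
    simp [hstop]
  | succ f ih =>
    intro tokens i k hk hf
    set e : Nat := PySem.Int.bitLength (k : Int) with he
    obtain ⟨hl, hr⟩ := blen_bounds k hk
    have hep := blen_pos k hk
    by_cases hlt : i + 1 < (cs.length : Int)
    · have hc : (1 : Int) ≤ (2 : Int) ^ e - (k : Int) := by
        have : (k : Int) < (2 : Int) ^ e := by exact_mod_cast hr
        omega
      have hg : i + 1 < (cs.length : Int) ∧ 0 < (e : Int) + bps ∧ (1 : Int) ≤ (2 : Int) ^ e - (k : Int) :=
        ⟨hlt, by push_cast; omega, hc⟩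
      rw [refLoop, dif_pos hg, tcCutsB, if_pos hlt]
      have hlen : bps + (PySem.Int.bitLength (k : Int) : Int) = (e : Int) + bps := by
        rw [← he]; ring
      have htoNat : ((e : Int)).toNat = e := by omega
      simp only [hlen, List.map_cons]
      have hrender : tcRenderB cs (i, (e : Int) + bps)
          = String.ofList (if (e : Int) + bps + i + 1 < (cs.length : Int)
              then PySem.List.slice cs (some i) (some (i + ((e : Int) + bps)))
              else PySem.List.slice cs (some i) none) := by
        unfold tcRenderB
        by_cases hcond : (e : Int) + bps + i + 1 < (cs.length : Int) <;> simp [hcond]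
      by_cases hz : (2 : Int) ^ e - (k : Int) - 1 = 0
      · -- k = 2^e - 1; next ordinal k+1 = 2^e has bit length e+1
        rw [if_pos hz]
        have hk1 : k + 1 = 2 ^ e := by
          have h2 : ((k + 1 : Nat) : Int) = ((2 ^ e : Nat) : Int) := by push_cast; omega
          exact_mod_cast h2
        have hbl : PySem.Int.bitLength ((k + 1 : Nat) : Int) = e + 1 := by
          apply blen_unique _ _ (by omega) (by omega)
          · simp [hk1]
          · rw [hk1]; exact Nat.pow_lt_pow_right (by norm_num) (by omega)
        have hrec := ih (tokens ++ [String.ofList (if (e : Int) + bps + i + 1 < (cs.length : Int)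
            then PySem.List.slice cs (some i) (some (i + ((e : Int) + bps)))
            else PySem.List.slice cs (some i) none)]) (i + ((e : Int) + bps)) (k + 1)
            (by omega) (by omega)
        rw [hbl] at hrec
        have hcast : (((k + 1 : Nat)) : Int) = (k : Int) + 1 := by push_cast; ring
        rw [hcast] at hrec
        have hpow : ((2 : Int) ^ (e + 1) - ((k : Int) + 1)) = (2 : Int) ^ ((e : Int)).toNat := by
          rw [htoNat]; have : ((k : Int)) = (2 : Int) ^ e - 1 := by omega
          rw [this]; ring
        have hcaste : (((e + 1 : Nat)) : Int) = (e : Int) + 1 := by push_cast; ring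
        rw [hcaste, hpow] at hrec
        rw [hrec]
        simp [hrender, List.append_assoc]
      · -- k + 1 < 2^e keeps the same bit length
        rw [if_neg hz]
        have hk1 : k + 1 < 2 ^ e := by
          have h2 : (k : Int) + 1 < (2 : Int) ^ e := by omega
          exact_mod_cast h2
        have hbl : PySem.Int.bitLength ((k + 1 : Nat) : Int) = e := by
          exact blen_unique _ _ (by omega) hep (le_trans hl (by omega)) hk1
        have hrec := ih (tokens ++ [String.ofList (if (e : Int) + bps + i + 1 < (cs.length : Int)
            then PySem.List.slice cs (some i) (some (i + ((e : Int) + bps)))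
            else PySem.List.slice cs (some i) none)]) (i + ((e : Int) + bps)) (k + 1)
            (by omega) (by omega)
        rw [hbl] at hrec
        have hcast : (((k + 1 : Nat)) : Int) = (k : Int) + 1 := by push_cast; ring
        rw [hcast] at hrec
        have hsub : (2 : Int) ^ e - ((k : Int) + 1) = (2 : Int) ^ e - (k : Int) - 1 := by ring
        rw [hsub] at hrec
        rw [hrec]
        simp [hrender, List.append_assoc]
    · rw [refLoop, tcCutsB]
      simp [hlt]

-- unfolding lemma for tcCutsB at successor fuel (the literal fuel below is cs.length + 1 + 1)
lemma tcCutsB_succ (n bps : Int) (f : Nat) (start k : Int) :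
    tcCutsB n bps (f + 1) start k
      = if start + 1 < n then
          (start, bps + (PySem.Int.bitLength k : Int))
            :: tcCutsB n bps f (start + (bps + (PySem.Int.bitLength k : Int))) (k + 1)
        else [] := rfl

-- ===== VERDICT (by name: the statement is the Claim_ definition above) =====
theorem tokenizeCompressed_spec : Claim_equal_tokenizeCompressed := by
  intro s bps _ hpre
  unfold Spec_tokenizeCompressed tokenizeCompressed
  have hb : 0 ≤ bps := hpre
  set cs := s.toList with hcs
  rw [show tokenizeCompressed_alt s bps
      = tcPass2 cs bps (tcCutsB (cs.length : Int) bps (cs.length + 2) 0 0) from rfl]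
  by_cases hn : (cs.length : Int) < 2
  · have hstop : ¬ ((0 : Int) + 1 < (cs.length : Int)) := by omega
    rw [tcLoopA, if_neg hstop,
      show (cs.length + 2) = (cs.length + 1) + 1 from rfl, tcCutsB_succ, if_neg hstop, tcPass2]
  · have hlt : (0 : Int) + 1 < (cs.length : Int) := by omega
    have h01 : (0 : Int) < 1 := by omega
    rw [tcLoopA, if_pos hlt, if_pos h01,
      show (cs.length + 2) = (cs.length + 1) + 1 from rfl, tcCutsB_succ, if_pos hlt, tcPass2]
    simp only [List.nil_append]
    have hbl0 : PySem.Int.bitLength (0 : Int) = 0 := PySem.Int.bitLength_zero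
    have hbl1 : PySem.Int.bitLength ((1 : Nat) : Int) = 1 := by decide
    have hrec := ref_eq_cuts cs bps hb (cs.length + 1)
        [String.ofList (PySem.List.slice cs (some 0) (some bps))] bps 1 (by omega) (by omega)
    rw [hbl1] at hrec
    norm_num at hrec
    simp only [hbl0, Nat.cast_zero, add_zero, zero_add]
    rw [A_eq_ref cs bps (cs.length + 1) _ 1 bps 1 1 hb (by omega) (by omega) (by omega) (by omega)]
    norm_num
    exact hrec
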